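-- pv_equiv track=rewrite | github.com/alejandrogonzalvo/qusim | python/quadris/dse/topology.py | inter_core_neighbors
-- ===== SOURCE A (Python) =====
-- import math
--
-- def inter_core_neighbors(num_cores: int, inter_topology: str) -> list[list[int]]:
--     """Per-core list of unique neighbouring core indices."""
--     if num_cores < 2:
--         return [[] for _ in range(num_cores)]
--     nbrs: list[list[int]] = [[] for _ in range(num_cores)]
--     inter = (inter_topology or "ring").lower()
--     if inter == "ring":
--         for c in range(num_cores):
--             nbrs[c].append((c + 1) % num_cores)
--             if num_cores > 2:
--                 nbrs[c].append((c - 1) % num_cores)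
--     elif inter == "linear":
--         for c in range(num_cores):
--             if c + 1 < num_cores:
--                 nbrs[c].append(c + 1)
--             if c - 1 >= 0:
--                 nbrs[c].append(c - 1)
--     elif inter == "all_to_all":
--         for c in range(num_cores):
--             for c2 in range(num_cores):
--                 if c2 != c:
--                     nbrs[c].append(c2)
--     elif inter == "grid":
--         side = math.ceil(math.sqrt(num_cores))
--         for c in range(num_cores):
--             row, col = divmod(c, side)
--             if col + 1 < side and c + 1 < num_cores:
--                 nbrs[c].append(c + 1)
--             if col > 0 and c - 1 >= 0:
--                 nbrs[c].append(c - 1)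
--             if c + side < num_cores:
--                 nbrs[c].append(c + side)
--             if c - side >= 0:
--                 nbrs[c].append(c - side)
--     else:
--         for c in range(num_cores):
--             nbrs[c].append((c + 1) % num_cores)
--             if num_cores > 2:
--                 nbrs[c].append((c - 1) % num_cores)
--     return [sorted(set(n)) for n in nbrs]
-- ===== SOURCE B (Python) =====
-- import math
--
-- def inter_core_neighbors(num_cores: int, inter_topology: str) -> list[list[int]]:
--     """Per-core list of unique neighbouring core indices (edge-centric build)."""
--     if num_cores < 2:
--         return [[] for _ in range(num_cores)]
--     t = (inter_topology or "ring").lower()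
--     edges: list[tuple[int, int]] = []
--     if t == "linear":
--         for c in range(num_cores - 1):
--             edges.append((c, c + 1))
--     elif t == "all_to_all":
--         for u in range(num_cores):
--             for v in range(u + 1, num_cores):
--                 edges.append((u, v))
--     elif t == "grid":
--         side = math.isqrt(num_cores)
--         if side * side < num_cores:
--             side += 1
--         for c in range(num_cores):
--             if c % side + 1 < side and c + 1 < num_cores:
--                 edges.append((c, c + 1))
--             if c + side < num_cores:
--                 edges.append((c, c + side))
--     else:  # "ring" and any unknown topology name
--         for c in range(num_cores):
--             edges.append((c, (c + 1) % num_cores))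
--     nbrs: list[list[int]] = [[] for _ in range(num_cores)]
--     for u, v in edges:
--         nbrs[u].append(v)
--         nbrs[v].append(u)
--     return [sorted(set(n)) for n in nbrs]
-- ===== Notes on version B (the rewrite author's own statement) =====
-- stated objective: alternative
-- what changed: B is edge-centric: it builds an undirected edge list per topology (one edge per pair, e.g. only (c,c+1)-type edges for ring/linear/grid and u<v pairs for all_to_all), then derives the per-core adjacency by appending both endpoints of every edge, instead of A's node-centric loop that computes each core's neighbours by modular/boundary arithmetic; the final sorted(set(...)) pass is kept.
import Mathlib
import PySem

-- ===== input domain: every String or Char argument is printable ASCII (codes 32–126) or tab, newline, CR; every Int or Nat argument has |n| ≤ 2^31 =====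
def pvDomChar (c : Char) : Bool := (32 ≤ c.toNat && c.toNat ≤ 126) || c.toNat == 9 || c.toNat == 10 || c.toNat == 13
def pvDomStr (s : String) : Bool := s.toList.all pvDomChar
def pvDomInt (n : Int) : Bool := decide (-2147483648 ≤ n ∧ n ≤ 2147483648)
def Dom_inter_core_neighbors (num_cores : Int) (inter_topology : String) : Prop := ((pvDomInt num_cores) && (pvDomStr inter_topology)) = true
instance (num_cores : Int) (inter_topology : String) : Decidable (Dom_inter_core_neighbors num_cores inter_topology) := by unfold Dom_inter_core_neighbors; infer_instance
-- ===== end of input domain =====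

-- B is edge-centric (one undirected edge list per topology, adjacency derived from it)
-- where A is node-centric; same return value, no speed claim. A mutates nothing.

-- Python `nbrs[i].append(x)` on a list of lists, functional form (shared Python-list semantics).
def pvAppendAt (nbrs : List (List Int)) (i : Int) (x : Int) : List (List Int) :=
  PySem.List.pySetD nbrs i (PySem.List.pyGetD nbrs i [] ++ [x])

-- ===== PORT A =====
-- math.ceil(math.sqrt(n)): exact for 0 ≤ n ≤ 2^31 (IEEE-754 sqrt is correctly rounded there).
def pvCeilSqrt (n : Int) : Int :=
  if (Nat.sqrt n.toNat : Int) * (Nat.sqrt n.toNat : Int) = n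
  then (Nat.sqrt n.toNat : Int) else (Nat.sqrt n.toNat : Int) + 1

def inter_core_neighbors (num_cores : Int) (inter_topology : String) : List (List Int) :=
  if num_cores < 2 then (PySem.List.pyRange 0 num_cores 1).map (fun _ => []) else
  let nbrs0 : List (List Int) := (PySem.List.pyRange 0 num_cores 1).map (fun _ => [])
  let inter := PySem.Str.lower (if inter_topology = "" then "ring" else inter_topology)
  let nbrs :=
    if inter = "ring" then
      (PySem.List.pyRange 0 num_cores 1).foldl (fun nbrs c =>
        let nbrs := pvAppendAt nbrs c (PySem.Int.mod (c + 1) num_cores)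
        if 2 < num_cores then pvAppendAt nbrs c (PySem.Int.mod (c - 1) num_cores) else nbrs) nbrs0
    else if inter = "linear" then
      (PySem.List.pyRange 0 num_cores 1).foldl (fun nbrs c =>
        let nbrs := if c + 1 < num_cores then pvAppendAt nbrs c (c + 1) else nbrs
        if 0 ≤ c - 1 then pvAppendAt nbrs c (c - 1) else nbrs) nbrs0
    else if inter = "all_to_all" then
      (PySem.List.pyRange 0 num_cores 1).foldl (fun nbrs c =>
        (PySem.List.pyRange 0 num_cores 1).foldl (fun nbrs c2 =>
          if c2 ≠ c then pvAppendAt nbrs c c2 else nbrs) nbrs) nbrs0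
    else if inter = "grid" then
      let side := pvCeilSqrt num_cores
      (PySem.List.pyRange 0 num_cores 1).foldl (fun nbrs c =>
        -- row, col = divmod(c, side); row is never used by A
        let col := PySem.Int.mod c side
        let nbrs := if col + 1 < side ∧ c + 1 < num_cores then pvAppendAt nbrs c (c + 1) else nbrs
        let nbrs := if 0 < col ∧ 0 ≤ c - 1 then pvAppendAt nbrs c (c - 1) else nbrs
        let nbrs := if c + side < num_cores then pvAppendAt nbrs c (c + side) else nbrs
        if 0 ≤ c - side then pvAppendAt nbrs c (c - side) else nbrs) nbrs0
    else
      (PySem.List.pyRange 0 num_cores 1).foldl (fun nbrs c =>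
        let nbrs := pvAppendAt nbrs c (PySem.Int.mod (c + 1) num_cores)
        if 2 < num_cores then pvAppendAt nbrs c (PySem.Int.mod (c - 1) num_cores) else nbrs) nbrs0
  -- sorted(set(n)): order-safe consumption of the set (sorted, no key)
  nbrs.map (fun nr => PySem.List.sorted (PySem.Set.ofList nr) (fun x => x))

-- ===== PORT B =====
def inter_core_neighbors_alt (num_cores : Int) (inter_topology : String) : List (List Int) :=
  if num_cores < 2 then (PySem.List.pyRange 0 num_cores 1).map (fun _ => []) else
  let t := PySem.Str.lower (if inter_topology = "" then "ring" else inter_topology)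
  let edges : List (Int × Int) :=
    if t = "linear" then
      (PySem.List.pyRange 0 (num_cores - 1) 1).foldl (fun es c => es ++ [(c, c + 1)]) []
    else if t = "all_to_all" then
      (PySem.List.pyRange 0 num_cores 1).foldl (fun es u =>
        (PySem.List.pyRange (u + 1) num_cores 1).foldl (fun es v => es ++ [(u, v)]) es) []
    else if t = "grid" then
      -- side = math.isqrt(num_cores); if side*side < num_cores: side += 1  (num_cores ≥ 2 here)
      let side0 : Int := (Nat.sqrt num_cores.toNat : Int)
      let side := if side0 * side0 < num_cores then side0 + 1 else side0
      (PySem.List.pyRange 0 num_cores 1).foldl (fun es c =>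
        let es := if PySem.Int.mod c side + 1 < side ∧ c + 1 < num_cores then es ++ [(c, c + 1)] else es
        if c + side < num_cores then es ++ [(c, c + side)] else es) []
    else  -- "ring" and any unknown topology name
      (PySem.List.pyRange 0 num_cores 1).foldl (fun es c => es ++ [(c, PySem.Int.mod (c + 1) num_cores)]) []
  let nbrs := edges.foldl (fun nbrs e => pvAppendAt (pvAppendAt nbrs e.1 e.2) e.2 e.1)
                ((PySem.List.pyRange 0 num_cores 1).map (fun _ => []))
  nbrs.map (fun nr => PySem.List.sorted (PySem.Set.ofList nr) (fun x => x))

-- ===== PRECONDITION & SPEC =====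
def Spec_inter_core_neighbors (num_cores : Int) (inter_topology : String) (out : List (List Int)) : Prop := out = inter_core_neighbors_alt num_cores inter_topology
instance (num_cores : Int) (inter_topology : String) (out : List (List Int)) : Decidable (Spec_inter_core_neighbors num_cores inter_topology out) := by unfold Spec_inter_core_neighbors; infer_instance

-- ===== CLAIM (what is proved, stated in full; the proofs are below) =====
def Claim_equal_inter_core_neighbors : Prop := ∀ (num_cores : Int) (inter_topology : String), Dom_inter_core_neighbors num_cores inter_topology → Spec_inter_core_neighbors num_cores inter_topology (inter_core_neighbors num_cores inter_topology)

-- ===== LEMMAS AND PROOFS =====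

-- `lst[i].append(x)` repeatedly at the same index i
def pvAppendAll (l : List (List Int)) (i : Int) (xs : List Int) : List (List Int) :=
  xs.foldl (fun l x => pvAppendAt l i x) l

theorem length_pvAppendAt (l : List (List Int)) (i : Int) (x : Int) :
    (pvAppendAt l i x).length = l.length := by
  simp [pvAppendAt, PySem.List.length_pySetD]

theorem getElem?_pvAppendAt (l : List (List Int)) (i : Int) (x : Int)
    (h0 : 0 ≤ i) (hi : i < l.length) (j : Nat) :
    (pvAppendAt l i x)[j]? = if (j : Int) = i then some ((l[j]?.getD []) ++ [x]) else l[j]? := by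
  unfold pvAppendAt
  rw [PySem.List.pySetD_of_nonneg l _ h0, PySem.List.pyGetD_of_nonneg l _ h0]
  rw [List.getElem?_set]
  have hlt : i.toNat < l.length := by omega
  split_ifs with h1 h2 h2
  · have hj : j = i.toNat := h1.symm
    subst hj
    simp [List.getD, hlt]
  · omega
  · omega
  · rfl

theorem length_pvAppendAll (l : List (List Int)) (i : Int) (xs : List Int) :
    (pvAppendAll l i xs).length = l.length := by
  induction xs generalizing l with
  | nil => rfl
  | cons x xs ih => simp [pvAppendAll] at ih ⊢; rw [ih, length_pvAppendAt]

theorem getElem?_pvAppendAll (l : List (List Int)) (i : Int) (xs : List Int)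
    (h0 : 0 ≤ i) (hi : i < l.length) (j : Nat) :
    (pvAppendAll l i xs)[j]? = if (j : Int) = i then some ((l[j]?.getD []) ++ xs) else l[j]? := by
  induction xs generalizing l with
  | nil =>
    simp only [pvAppendAll, List.foldl_nil, List.append_nil]
    split_ifs with h
    · have hj : j < l.length := by omega
      simp [List.getElem?_eq_getElem hj]
    · rfl
  | cons x xs ih =>
    have hi' : i < (pvAppendAt l i x).length := by rw [length_pvAppendAt]; exact hi
    have := ih (pvAppendAt l i x) hi'
    simp only [pvAppendAll, List.foldl_cons] at this ⊢
    rw [this, getElem?_pvAppendAt l i x h0 hi j]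
    split_ifs with h
    · simp
    · rfl

-- A's node-centric loop: entry c of the result is exactly the per-core additions `add c`.
theorem foldA_gen (n : Int) (add : Int → List Int) :
    ∀ (k : Nat) (a : Int), 0 ≤ a → (n - a).toNat = k →
    ∀ (l : List (List Int)), l.length = n.toNat →
      (∀ j : Nat, (j : Int) < a → l[j]? = some (add j)) →
      (∀ j : Nat, a ≤ (j : Int) → j < l.length → l[j]? = some []) →
      (PySem.List.pyRange a n 1).foldl (fun l c => pvAppendAll l c (add c)) l
        = (PySem.List.pyRange 0 n 1).map add := by
  intro k
  induction k with
  | zero =>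
    intro a ha hk l hlen hlo hhi
    have hna : n ≤ a := by omega
    rw [PySem.List.pyRange_one_eq_nil hna]
    simp only [List.foldl_nil]
    apply List.ext_getElem?
    intro j
    rw [List.getElem?_map, PySem.List.getElem?_pyRange_one]
    by_cases hj : j < l.length
    · have : (j : Int) < a := by omega
      rw [hlo j this, if_pos (by omega)]
      norm_num
    · rw [List.getElem?_eq_none (by omega), if_neg (by omega)]
      rfl
  | succ k ih =>
    intro a ha hk l hlen hlo hhi
    have han : a < n := by omega
    rw [PySem.List.pyRange_one_cons han]
    simp only [List.foldl_cons]
    have hal : a < (l.length : Int) := by omega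
    apply ih (a + 1) (by omega) (by omega)
    · rw [length_pvAppendAll]; exact hlen
    · intro j hj
      rw [getElem?_pvAppendAll l a (add a) ha hal j]
      by_cases hja : (j : Int) = a
      · rw [if_pos hja, hhi j (by omega) (by omega)]
        simp [hja]
      · rw [if_neg hja]
        exact hlo j (by omega)
    · intro j hj hjl
      rw [getElem?_pvAppendAll l a (add a) ha hal j, if_neg (by omega)]
      rw [length_pvAppendAll] at hjl
      exact hhi j (by omega) hjl

theorem foldA (n : Int) (add : Int → List Int) :
    (PySem.List.pyRange 0 n 1).foldl (fun l c => pvAppendAll l c (add c))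
        ((PySem.List.pyRange 0 n 1).map (fun _ => [])) = (PySem.List.pyRange 0 n 1).map add := by
  apply foldA_gen n add (n - 0).toNat 0 le_rfl rfl
  · simp [PySem.List.length_pyRange_one]
  · intro j hj; omega
  · intro j _ hjl
    rw [List.getElem?_map, PySem.List.getElem?_pyRange_one,
        if_pos (by simpa [PySem.List.length_pyRange_one] using hjl)]
    rfl

-- B's edge loop: length preservation and membership in entry j.
theorem length_foldB (edges : List (Int × Int)) (l : List (List Int)) :
    (edges.foldl (fun nbrs e => pvAppendAt (pvAppendAt nbrs e.1 e.2) e.2 e.1) l).length = l.length := by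
  induction edges generalizing l with
  | nil => rfl
  | cons e es ih => simp only [List.foldl_cons]; rw [ih, length_pvAppendAt, length_pvAppendAt]

theorem mem_foldB (edges : List (Int × Int)) (l : List (List Int))
    (hval : ∀ e ∈ edges, 0 ≤ e.1 ∧ e.1 < l.length ∧ 0 ≤ e.2 ∧ e.2 < l.length)
    (j : Nat) (hj : j < l.length) (x : Int) :
    (x ∈ ((edges.foldl (fun nbrs e => pvAppendAt (pvAppendAt nbrs e.1 e.2) e.2 e.1) l)[j]?.getD []))
      ↔ x ∈ (l[j]?.getD []) ∨ ∃ e ∈ edges, (e.1 = (j : Int) ∧ e.2 = x) ∨ (e.2 = (j : Int) ∧ e.1 = x) := by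
  induction edges generalizing l with
  | nil => simp
  | cons e es ih =>
    obtain ⟨h1, h2, h3, h4⟩ := hval e (by simp)
    have hstep : ∀ (m : List (List Int)), m.length = l.length →
        (pvAppendAt (pvAppendAt m e.1 e.2) e.2 e.1).length = l.length := by
      intro m hm; rw [length_pvAppendAt, length_pvAppendAt, hm]
    simp only [List.foldl_cons]
    rw [ih (pvAppendAt (pvAppendAt l e.1 e.2) e.2 e.1)
        (by intro e' he'; have := hval e' (by simp [he']); rwa [hstep l rfl])
        (by rwa [hstep l rfl])]
    have h12 : e.1 < ((pvAppendAt l e.1 e.2).length : Int) := by rw [length_pvAppendAt]; exact h2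
    have h42 : e.2 < ((pvAppendAt l e.1 e.2).length : Int) := by rw [length_pvAppendAt]; exact h4
    rw [getElem?_pvAppendAt _ e.2 e.1 h3 h42 j, getElem?_pvAppendAt l e.1 e.2 h1 h2 j]
    constructor
    · rintro (hmem | ⟨e', he', hcase⟩)
      · by_cases hje2 : (j : Int) = e.2
        · rw [if_pos hje2] at hmem
          simp only [Option.getD_some, List.mem_append, List.mem_singleton] at hmem
          rcases hmem with hmem | hx
          · by_cases hje1 : (j : Int) = e.1
            · rw [if_pos hje1] at hmem
              simp only [Option.getD_some, List.mem_append, List.mem_singleton] at hmem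
              rcases hmem with hmem | hx
              · exact Or.inl hmem
              · exact Or.inr ⟨e, by simp, Or.inl ⟨hje1.symm, hx.symm⟩⟩
            · rw [if_neg hje1] at hmem
              exact Or.inl hmem
          · exact Or.inr ⟨e, by simp, Or.inr ⟨hje2.symm, hx.symm⟩⟩
        · rw [if_neg hje2] at hmem
          by_cases hje1 : (j : Int) = e.1
          · rw [if_pos hje1] at hmem
            simp only [Option.getD_some, List.mem_append, List.mem_singleton] at hmem
            rcases hmem with hmem | hx
            · exact Or.inl hmem
            · exact Or.inr ⟨e, by simp, Or.inl ⟨hje1.symm, hx.symm⟩⟩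
          · rw [if_neg hje1] at hmem
            exact Or.inl hmem
      · exact Or.inr ⟨e', by simp [he'], hcase⟩
    · rintro (hmem | ⟨e', he', hcase⟩)
      · clear ih; left; split_ifs <;> simp [hmem]
      · rcases List.mem_cons.mp he' with he'' | he''
        · subst he''
          clear hval hstep h12 h42 hj
          rcases hcase with ⟨hj1, hx1⟩ | ⟨hj1, hx1⟩ <;>
            (left; rw [hj1, hx1]; split_ifs <;> simp_all)
        · exact Or.inr ⟨e', he'', hcase⟩

-- sorted(set(xs)) depends only on the members of xs
theorem pvSortedSet_ext (xs ys : List Int) (h : ∀ x, x ∈ xs ↔ x ∈ ys) :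
    PySem.List.sorted (PySem.Set.ofList xs) (fun x => x)
      = PySem.List.sorted (PySem.Set.ofList ys) (fun x => x) := by
  apply PySem.List.sorted_eq_of_perm_of_pairwise_lt
  · refine (PySem.List.sorted_perm (PySem.Set.ofList ys) (fun x => x) false).trans ?_
    rw [List.perm_ext_iff_of_nodup (PySem.Set.nodup_ofList ys) (PySem.Set.nodup_ofList xs)]
    intro a
    rw [PySem.Set.mem_ofList, PySem.Set.mem_ofList]
    exact (h a).symm
  · exact PySem.List.sorted_ofList_pairwise_lt ys

-- generic per-branch equality: if the per-core additions of A and the edge list of B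
-- describe the same neighbour relation, the two final results coincide.
theorem branch_eq (n : Int) (hn : 2 ≤ n) (add : Int → List Int) (edges : List (Int × Int))
    (hval : ∀ e ∈ edges, 0 ≤ e.1 ∧ e.1 < n ∧ 0 ≤ e.2 ∧ e.2 < n)
    (hmem : ∀ c x : Int, 0 ≤ c → c < n →
      (x ∈ add c ↔ ∃ e ∈ edges, (e.1 = c ∧ e.2 = x) ∨ (e.2 = c ∧ e.1 = x))) :
    ((PySem.List.pyRange 0 n 1).map add).map
        (fun nr => PySem.List.sorted (PySem.Set.ofList nr) (fun x => x))
      = (edges.foldl (fun nbrs e => pvAppendAt (pvAppendAt nbrs e.1 e.2) e.2 e.1)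
          ((PySem.List.pyRange 0 n 1).map (fun _ => []))).map
        (fun nr => PySem.List.sorted (PySem.Set.ofList nr) (fun x => x)) := by
  have hlen0 : ((PySem.List.pyRange 0 n 1).map (fun _ => ([] : List Int))).length = n.toNat := by
    simp [PySem.List.length_pyRange_one]
  have hval' : ∀ e ∈ edges, 0 ≤ e.1 ∧
      e.1 < (((PySem.List.pyRange 0 n 1).map (fun _ => ([] : List Int))).length : Int) ∧
      0 ≤ e.2 ∧ e.2 < (((PySem.List.pyRange 0 n 1).map (fun _ => ([] : List Int))).length : Int) := by
    intro e he
    obtain ⟨a, b, c, d⟩ := hval e he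
    rw [hlen0]
    refine ⟨a, by omega, c, by omega⟩
  apply List.ext_getElem?
  intro j
  rw [List.getElem?_map, List.getElem?_map, List.getElem?_map, PySem.List.getElem?_pyRange_one]
  by_cases hj : j < n.toNat
  · rw [if_pos (by omega)]
    have hjf : j < (edges.foldl (fun nbrs e => pvAppendAt (pvAppendAt nbrs e.1 e.2) e.2 e.1)
        ((PySem.List.pyRange 0 n 1).map (fun _ => ([] : List Int)))).length := by
      rw [length_foldB, hlen0]; exact hj
    rw [List.getElem?_eq_getElem hjf]
    simp only [Option.map_some]
    congr 1
    apply pvSortedSet_ext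
    intro x
    have hget : (edges.foldl (fun nbrs e => pvAppendAt (pvAppendAt nbrs e.1 e.2) e.2 e.1)
          ((PySem.List.pyRange 0 n 1).map (fun _ => ([] : List Int))))[j]
        = (edges.foldl (fun nbrs e => pvAppendAt (pvAppendAt nbrs e.1 e.2) e.2 e.1)
          ((PySem.List.pyRange 0 n 1).map (fun _ => ([] : List Int))))[j]?.getD [] := by
      rw [List.getElem?_eq_getElem hjf]; rfl
    rw [hget, mem_foldB edges _ hval' j (by rw [hlen0]; exact hj) x]
    have hinit : ((PySem.List.pyRange 0 n 1).map (fun _ => ([] : List Int)))[j]? = some [] := by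
      rw [List.getElem?_map, PySem.List.getElem?_pyRange_one, if_pos (by omega)]
      rfl
    rw [hinit]
    simp only [Option.getD_some, List.not_mem_nil, false_or]
    simp only [zero_add]
    exact hmem j x (by omega) (by omega)
  · rw [if_neg (by omega)]
    rw [List.getElem?_eq_none (by rw [length_foldB, hlen0]; omega)]
    rfl


-- modular arithmetic of Python's % (positive divisor) used by the ring and grid branches
theorem pvEmodSucc (n c : Int) (h0 : 0 ≤ c) (h1 : c < n) :
    (c + 1) % n = if c + 1 = n then 0 else c + 1 := by
  split_ifs with h
  · rw [h]; exact Int.emod_self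
  · exact Int.emod_eq_of_lt (by omega) (by omega)

theorem pvEmodPred (n c : Int) (h0 : 0 ≤ c) (h1 : c < n) :
    (c - 1) % n = if c = 0 then n - 1 else c - 1 := by
  split_ifs with h
  · subst h
    have : (0 - 1 : Int) = (n - 1) + n * (-1) := by ring
    rw [this, Int.add_mul_emod_self_left]
    exact Int.emod_eq_of_lt (by omega) (by omega)
  · exact Int.emod_eq_of_lt (by omega) (by omega)

theorem pvEmodSubOne (s c : Int) (hs : 0 < s) (h : 0 < c % s) :
    (c - 1) % s = c % s - 1 := by
  have hdm := Int.mul_ediv_add_emod c s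
  have hb1 : 0 ≤ c % s := Int.emod_nonneg c (by omega)
  have hb2 : c % s < s := Int.emod_lt_of_pos c hs
  have : c - 1 = (c % s - 1) + s * (c / s) := by omega
  rw [this, Int.add_mul_emod_self_left]
  exact Int.emod_eq_of_lt (by omega) (by omega)

theorem pvEmodAddOne (s u : Int) (hs : 0 < s) (h : u % s + 1 < s) :
    (u + 1) % s = u % s + 1 := by
  have hdm := Int.mul_ediv_add_emod u s
  have hb1 : 0 ≤ u % s := Int.emod_nonneg u (by omega)
  have : u + 1 = (u % s + 1) + s * (u / s) := by omega
  rw [this, Int.add_mul_emod_self_left]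
  exact Int.emod_eq_of_lt (by omega) (by omega)

-- per-core additions of A's branches, and B's edge lists
def addRing (n c : Int) : List Int :=
  [PySem.Int.mod (c + 1) n] ++ (if 2 < n then [PySem.Int.mod (c - 1) n] else [])
def edgesRing (n : Int) : List (Int × Int) :=
  (PySem.List.pyRange 0 n 1).map (fun c => (c, PySem.Int.mod (c + 1) n))
def addLin (n c : Int) : List Int :=
  (if c + 1 < n then [c + 1] else []) ++ (if 0 ≤ c - 1 then [c - 1] else [])
def edgesLin (n : Int) : List (Int × Int) :=
  (PySem.List.pyRange 0 (n - 1) 1).map (fun c => (c, c + 1))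
def addAll (n c : Int) : List Int :=
  (PySem.List.pyRange 0 n 1).filter (fun c2 => c2 ≠ c)
def edgesAll (n : Int) : List (Int × Int) :=
  (PySem.List.pyRange 0 n 1).flatMap (fun u => (PySem.List.pyRange (u + 1) n 1).map (fun v => (u, v)))
def addGrid (n s c : Int) : List Int :=
  (if PySem.Int.mod c s + 1 < s ∧ c + 1 < n then [c + 1] else []) ++
  (if 0 < PySem.Int.mod c s ∧ 0 ≤ c - 1 then [c - 1] else []) ++
  (if c + s < n then [c + s] else []) ++
  (if 0 ≤ c - s then [c - s] else [])
def edgesGrid (n s : Int) : List (Int × Int) :=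
  (PySem.List.pyRange 0 n 1).flatMap (fun c =>
    (if PySem.Int.mod c s + 1 < s ∧ c + 1 < n then [(c, c + 1)] else []) ++
    (if c + s < n then [(c, c + s)] else []))

theorem memRing (n c x : Int) (hn : 2 ≤ n) (h0 : 0 ≤ c) (h1 : c < n) :
    x ∈ addRing n c ↔ ∃ e ∈ edgesRing n, (e.1 = c ∧ e.2 = x) ∨ (e.2 = c ∧ e.1 = x) := by
  have hpos : (0 : Int) < n := by omega
  simp only [addRing, edgesRing, List.mem_map, List.mem_append, List.mem_singleton,
    PySem.Int.mod_eq_emod_of_pos hpos, PySem.List.mem_pyRange_one]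
  constructor
  · rintro (hx | hx)
    · exact ⟨(c, (c + 1) % n), ⟨c, ⟨h0, h1⟩, rfl⟩, Or.inl ⟨rfl, hx.symm⟩⟩
    · by_cases h2 : 2 < n
      · rw [if_pos h2] at hx
        simp only [List.mem_singleton] at hx
        refine ⟨((c - 1) % n, ((c - 1) % n + 1) % n), ⟨(c - 1) % n, ?_, rfl⟩, Or.inr ⟨?_, hx.symm⟩⟩
        · rw [pvEmodPred n c h0 h1]
          split_ifs <;> omega
        · rw [pvEmodPred n c h0 h1]
          split_ifs with hc0
          · rw [pvEmodSucc n (n - 1) (by omega) (by omega)]; simp [hc0]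
          · rw [pvEmodSucc n (c - 1) (by omega) (by omega)]
            split_ifs with h3 <;> omega
      · rw [if_neg h2] at hx; simp at hx
  · rintro ⟨e, ⟨u, ⟨hu0, hu1⟩, rfl⟩, ⟨h1', h2'⟩ | ⟨h1', h2'⟩⟩ <;> dsimp only at h1' h2'
    · subst h1'; left; exact h2'.symm
    · subst h2'
      rw [pvEmodSucc n u hu0 hu1] at h1'
      by_cases h2 : 2 < n
      · right
        rw [if_pos h2]
        simp only [List.mem_singleton]
        rw [pvEmodPred n c h0 h1]
        split_ifs at h1' ⊢ <;> omega
      · left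
        rw [pvEmodSucc n c h0 h1]
        split_ifs at h1' ⊢ <;> omega

theorem memLin (n c x : Int) (h0 : 0 ≤ c) (h1 : c < n) :
    x ∈ addLin n c ↔ ∃ e ∈ edgesLin n, (e.1 = c ∧ e.2 = x) ∨ (e.2 = c ∧ e.1 = x) := by
  simp only [addLin, edgesLin, List.mem_map, List.mem_append, PySem.List.mem_pyRange_one]
  constructor
  · rintro (hx | hx)
    · by_cases h : c + 1 < n
      · rw [if_pos h] at hx; simp only [List.mem_singleton] at hx
        exact ⟨(c, c + 1), ⟨c, ⟨h0, by omega⟩, rfl⟩, Or.inl ⟨rfl, hx.symm⟩⟩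
      · rw [if_neg h] at hx; simp at hx
    · by_cases h : 0 ≤ c - 1
      · rw [if_pos h] at hx; simp only [List.mem_singleton] at hx
        exact ⟨(c - 1, c), ⟨c - 1, ⟨by omega, by omega⟩, by simp⟩, Or.inr ⟨rfl, hx.symm⟩⟩
      · rw [if_neg h] at hx; simp at hx
  · rintro ⟨e, ⟨u, ⟨hu0, hu1⟩, rfl⟩, ⟨ha, hb⟩ | ⟨ha, hb⟩⟩ <;> dsimp only at ha hb
    · left; rw [if_pos (by omega)]; simp; omega
    · right; rw [if_pos (by omega)]; simp; omega

theorem memAll (n c x : Int) (h0 : 0 ≤ c) (h1 : c < n) :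
    x ∈ addAll n c ↔ ∃ e ∈ edgesAll n, (e.1 = c ∧ e.2 = x) ∨ (e.2 = c ∧ e.1 = x) := by
  simp only [addAll, edgesAll, List.mem_filter, List.mem_flatMap, List.mem_map,
    PySem.List.mem_pyRange_one, decide_eq_true_eq]
  constructor
  · rintro ⟨⟨hx0, hx1⟩, hne⟩
    by_cases h : c < x
    · exact ⟨(c, x), ⟨c, ⟨h0, h1⟩, x, ⟨by omega, hx1⟩, rfl⟩, Or.inl ⟨rfl, rfl⟩⟩
    · exact ⟨(x, c), ⟨x, ⟨hx0, hx1⟩, c, ⟨by omega, h1⟩, rfl⟩, Or.inr ⟨rfl, rfl⟩⟩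
  · rintro ⟨e, ⟨u, ⟨hu0, hu1⟩, v, ⟨hv0, hv1⟩, rfl⟩, ⟨ha, hb⟩ | ⟨ha, hb⟩⟩ <;> dsimp only at ha hb <;>
      (constructor; · omega
       · omega)

theorem memGrid (n s c x : Int) (hs : 0 < s) (h0 : 0 ≤ c) (h1 : c < n) :
    x ∈ addGrid n s c ↔ ∃ e ∈ edgesGrid n s, (e.1 = c ∧ e.2 = x) ∨ (e.2 = c ∧ e.1 = x) := by
  have hmodpos : ∀ a : Int, PySem.Int.mod a s = a % s := fun a => PySem.Int.mod_eq_emod_of_pos hs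
  have hb1 : 0 ≤ c % s := Int.emod_nonneg c (by omega)
  have hb2 : c % s < s := Int.emod_lt_of_pos c hs
  simp only [addGrid, edgesGrid, hmodpos, List.mem_flatMap, List.mem_append,
    PySem.List.mem_pyRange_one]
  constructor
  · rintro (((hx | hx) | hx) | hx)
    · split_ifs at hx with hcond
      · simp only [List.mem_singleton] at hx
        refine ⟨(c, c + 1), ⟨c, ⟨h0, h1⟩, Or.inl ?_⟩, Or.inl ⟨rfl, hx.symm⟩⟩
        rw [if_pos hcond]; simp
      · simp at hx
    · split_ifs at hx with hcond
      · simp only [List.mem_singleton] at hx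
        obtain ⟨hcol, hc1⟩ := hcond
        have hsub : (c - 1) % s = c % s - 1 := pvEmodSubOne s c hs hcol
        refine ⟨(c - 1, c - 1 + 1), ⟨c - 1, ⟨by omega, by omega⟩, Or.inl ?_⟩,
          Or.inr ⟨by dsimp only; omega, by dsimp only; omega⟩⟩
        rw [if_pos ⟨by omega, by omega⟩]; simp
      · simp at hx
    · split_ifs at hx with hcond
      · simp only [List.mem_singleton] at hx
        refine ⟨(c, c + s), ⟨c, ⟨h0, h1⟩, Or.inr ?_⟩, Or.inl ⟨rfl, hx.symm⟩⟩
        rw [if_pos hcond]; simp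
      · simp at hx
    · split_ifs at hx with hcond
      · simp only [List.mem_singleton] at hx
        refine ⟨(c - s, c - s + s), ⟨c - s, ⟨by omega, by omega⟩, Or.inr ?_⟩,
          Or.inr ⟨by dsimp only; omega, by dsimp only; omega⟩⟩
        rw [if_pos (by omega)]; simp
      · simp at hx
  · rintro ⟨e, ⟨u, ⟨hu0, hu1⟩, he⟩, hcase⟩
    have hub1 : 0 ≤ u % s := Int.emod_nonneg u (by omega)
    rcases he with he | he
    · split_ifs at he with hcond
      · simp only [List.mem_singleton] at he
        subst he
        obtain ⟨hcol, hun⟩ := hcond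
        rcases hcase with ⟨ha, hb⟩ | ⟨ha, hb⟩ <;> dsimp only at ha hb
        · subst ha; left; left; left; rw [if_pos ⟨by omega, by omega⟩]; simp [hb]
        · have hadd : (u + 1) % s = u % s + 1 := pvEmodAddOne s u hs hcol
          have hcs : c % s = u % s + 1 := by rw [← ha]; exact hadd
          left; left; right
          rw [if_pos ⟨by omega, by omega⟩]
          simp; omega
      · simp at he
    · split_ifs at he with hcond
      · simp only [List.mem_singleton] at he
        subst he
        rcases hcase with ⟨ha, hb⟩ | ⟨ha, hb⟩ <;> dsimp only at ha hb
        · subst ha; left; right; rw [if_pos hcond]; simp [hb]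
        · right; rw [if_pos (by omega)]; simp; omega
      · simp at he


-- the two surface forms of ceil(sqrt(n)) used by the two ports agree, and are positive
theorem pvCeilSqrt_eq (n : Int) (hn : 0 ≤ n) :
    pvCeilSqrt n = (if ((Nat.sqrt n.toNat : Int)) * ((Nat.sqrt n.toNat : Int)) < n
      then (Nat.sqrt n.toNat : Int) + 1 else (Nat.sqrt n.toNat : Int)) := by
  have hsq := Nat.sqrt_le' n.toNat
  rw [pow_two] at hsq
  have hk : ((Nat.sqrt n.toNat : Int)) * (Nat.sqrt n.toNat : Int) ≤ n := by
    calc ((Nat.sqrt n.toNat : Int)) * (Nat.sqrt n.toNat : Int)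
        = ((Nat.sqrt n.toNat * Nat.sqrt n.toNat : Nat) : Int) := by push_cast; ring
      _ ≤ (n.toNat : Int) := by exact_mod_cast hsq
      _ = n := Int.toNat_of_nonneg hn
  unfold pvCeilSqrt
  split_ifs <;> omega

theorem pvCeilSqrt_pos (n : Int) (hn : 2 ≤ n) : 0 < pvCeilSqrt n := by
  have hk0 : 0 ≤ (Nat.sqrt n.toNat : Int) := Int.natCast_nonneg _
  unfold pvCeilSqrt
  split_ifs with h
  · rcases eq_or_lt_of_le hk0 with he | hlt
    · exfalso; rw [← he] at h; simp at h; omega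
    · exact hlt
  · omega

-- endpoints of every edge lie in [0, n)
theorem valRing (n : Int) (hn : 2 ≤ n) :
    ∀ e ∈ edgesRing n, 0 ≤ e.1 ∧ e.1 < n ∧ 0 ≤ e.2 ∧ e.2 < n := by
  intro e he
  simp only [edgesRing, List.mem_map, PySem.List.mem_pyRange_one] at he
  obtain ⟨u, ⟨hu0, hu1⟩, rfl⟩ := he
  have hpos : (0 : Int) < n := by omega
  rw [PySem.Int.mod_eq_emod_of_pos hpos]
  exact ⟨hu0, hu1, Int.emod_nonneg _ (by omega), Int.emod_lt_of_pos _ hpos⟩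

theorem valLin (n : Int) :
    ∀ e ∈ edgesLin n, 0 ≤ e.1 ∧ e.1 < n ∧ 0 ≤ e.2 ∧ e.2 < n := by
  intro e he
  simp only [edgesLin, List.mem_map, PySem.List.mem_pyRange_one] at he
  obtain ⟨u, ⟨hu0, hu1⟩, rfl⟩ := he
  refine ⟨hu0, by omega, by omega, by omega⟩

theorem valAll (n : Int) :
    ∀ e ∈ edgesAll n, 0 ≤ e.1 ∧ e.1 < n ∧ 0 ≤ e.2 ∧ e.2 < n := by
  intro e he
  simp only [edgesAll, List.mem_flatMap, List.mem_map, PySem.List.mem_pyRange_one] at he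
  obtain ⟨u, ⟨hu0, hu1⟩, v, ⟨hv0, hv1⟩, rfl⟩ := he
  exact ⟨hu0, hu1, by omega, hv1⟩

theorem valGrid (n s : Int) (hs : 0 < s) :
    ∀ e ∈ edgesGrid n s, 0 ≤ e.1 ∧ e.1 < n ∧ 0 ≤ e.2 ∧ e.2 < n := by
  intro e he
  simp only [edgesGrid, List.mem_flatMap, List.mem_append, PySem.List.mem_pyRange_one] at he
  obtain ⟨u, ⟨hu0, hu1⟩, he | he⟩ := he <;> split_ifs at he with hcond <;>
    simp only [List.mem_singleton, List.not_mem_nil] at he <;> first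
    | exact False.elim he
    | (subst he; exact ⟨hu0, hu1, by omega, by omega⟩)

-- A's branch loops written as pvAppendAll folds, evaluated by foldA
theorem ringA (n : Int) :
    (PySem.List.pyRange 0 n 1).foldl (fun nbrs c =>
        let nbrs := pvAppendAt nbrs c (PySem.Int.mod (c + 1) n)
        if 2 < n then pvAppendAt nbrs c (PySem.Int.mod (c - 1) n) else nbrs)
      ((PySem.List.pyRange 0 n 1).map (fun _ => []))
      = (PySem.List.pyRange 0 n 1).map (addRing n) := by
  rw [← foldA n (addRing n)]
  congr 1
  funext l c
  dsimp only
  simp only [addRing, pvAppendAll]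
  split_ifs <;> rfl

theorem linA (n : Int) :
    (PySem.List.pyRange 0 n 1).foldl (fun nbrs c =>
        let nbrs := if c + 1 < n then pvAppendAt nbrs c (c + 1) else nbrs
        if 0 ≤ c - 1 then pvAppendAt nbrs c (c - 1) else nbrs)
      ((PySem.List.pyRange 0 n 1).map (fun _ => []))
      = (PySem.List.pyRange 0 n 1).map (addLin n) := by
  rw [← foldA n (addLin n)]
  congr 1
  funext l c
  dsimp only
  simp only [addLin, pvAppendAll]
  split_ifs <;> rfl

theorem allA (n : Int) :
    (PySem.List.pyRange 0 n 1).foldl (fun nbrs c =>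
        (PySem.List.pyRange 0 n 1).foldl (fun nbrs c2 =>
          if c2 ≠ c then pvAppendAt nbrs c c2 else nbrs) nbrs)
      ((PySem.List.pyRange 0 n 1).map (fun _ => []))
      = (PySem.List.pyRange 0 n 1).map (addAll n) := by
  rw [← foldA n (addAll n)]
  congr 1
  funext l c
  simp [pvAppendAll, addAll, List.foldl_filter]

theorem gridA (n s : Int) :
    (PySem.List.pyRange 0 n 1).foldl (fun nbrs c =>
        let col := PySem.Int.mod c s
        let nbrs := if col + 1 < s ∧ c + 1 < n then pvAppendAt nbrs c (c + 1) else nbrs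
        let nbrs := if 0 < col ∧ 0 ≤ c - 1 then pvAppendAt nbrs c (c - 1) else nbrs
        let nbrs := if c + s < n then pvAppendAt nbrs c (c + s) else nbrs
        if 0 ≤ c - s then pvAppendAt nbrs c (c - s) else nbrs)
      ((PySem.List.pyRange 0 n 1).map (fun _ => []))
      = (PySem.List.pyRange 0 n 1).map (addGrid n s) := by
  rw [← foldA n (addGrid n s)]
  congr 1
  funext l c
  dsimp only
  simp only [addGrid, pvAppendAll]
  split_ifs <;> rfl

-- B's edge-building loops, evaluated to the edge lists
theorem ringB (n : Int) :
    (PySem.List.pyRange 0 n 1).foldl (fun es c => es ++ [(c, PySem.Int.mod (c + 1) n)]) []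
      = edgesRing n := by
  rw [PySem.List.foldl_append_singleton_eq_map]
  rfl

theorem linB (n : Int) :
    (PySem.List.pyRange 0 (n - 1) 1).foldl (fun es c => es ++ [(c, c + 1)]) []
      = edgesLin n := by
  rw [PySem.List.foldl_append_singleton_eq_map]
  rfl

theorem allB (n : Int) :
    (PySem.List.pyRange 0 n 1).foldl (fun es u =>
        (PySem.List.pyRange (u + 1) n 1).foldl (fun es v => es ++ [(u, v)]) es) []
      = edgesAll n := by
  have hbody : (fun (es : List (Int × Int)) (u : Int) =>
      (PySem.List.pyRange (u + 1) n 1).foldl (fun es v => es ++ [(u, v)]) es)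
      = fun es u => es ++ (PySem.List.pyRange (u + 1) n 1).map (fun v => (u, v)) := by
    funext es u
    exact PySem.List.foldl_append_singleton_eq_map _ _ _
  rw [hbody, PySem.List.foldl_append_eq_flatMap]
  rfl

theorem gridB (n s : Int) :
    (PySem.List.pyRange 0 n 1).foldl (fun es c =>
        let es := if PySem.Int.mod c s + 1 < s ∧ c + 1 < n then es ++ [(c, c + 1)] else es
        if c + s < n then es ++ [(c, c + s)] else es) []
      = edgesGrid n s := by
  have hbody : (fun (es : List (Int × Int)) (c : Int) =>
      let es := if PySem.Int.mod c s + 1 < s ∧ c + 1 < n then es ++ [(c, c + 1)] else es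
      if c + s < n then es ++ [(c, c + s)] else es)
      = fun es c => es ++ ((if PySem.Int.mod c s + 1 < s ∧ c + 1 < n then [(c, c + 1)] else []) ++
          (if c + s < n then [(c, c + s)] else [])) := by
    funext es c
    by_cases h1 : PySem.Int.mod c s + 1 < s ∧ c + 1 < n <;> by_cases h2 : c + s < n <;>
      simp [h1, h2]
  rw [hbody, PySem.List.foldl_append_eq_flatMap]
  rfl

-- ===== VERDICT (by name: the statement is the Claim_ definition above) =====
theorem inter_core_neighbors_spec : Claim_equal_inter_core_neighbors := by
  intro n t _hdom
  unfold Spec_inter_core_neighbors inter_core_neighbors inter_core_neighbors_alt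
  by_cases hlt : n < 2
  · rw [if_pos hlt, if_pos hlt]
  · rw [if_neg hlt, if_neg hlt]
    have hn : 2 ≤ n := by omega
    dsimp only
    generalize PySem.Str.lower (if t = "" then "ring" else t) = inter
    by_cases hr : inter = "ring"
    · subst hr
      rw [if_pos rfl, if_neg (by decide), if_neg (by decide), if_neg (by decide)]
      rw [ringA n, ringB n]
      exact branch_eq n hn (addRing n) (edgesRing n) (valRing n hn)
        (fun c x h0 h1 => memRing n c x hn h0 h1)
    · by_cases hl : inter = "linear"
      · subst hl
        rw [if_neg (by decide), if_pos rfl, if_pos rfl]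
        rw [linA n, linB n]
        exact branch_eq n hn (addLin n) (edgesLin n) (valLin n)
          (fun c x h0 h1 => memLin n c x h0 h1)
      · by_cases ha : inter = "all_to_all"
        · subst ha
          rw [if_neg (by decide), if_neg (by decide), if_pos rfl,
              if_neg (by decide), if_pos rfl]
          rw [allA n, allB n]
          exact branch_eq n hn (addAll n) (edgesAll n) (valAll n)
            (fun c x h0 h1 => memAll n c x h0 h1)
        · by_cases hg : inter = "grid"
          · subst hg
            rw [if_neg (by decide), if_neg (by decide), if_neg (by decide), if_pos rfl,
                if_neg (by decide), if_neg (by decide), if_pos rfl]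
            rw [← pvCeilSqrt_eq n (by omega)]
            rw [gridA n (pvCeilSqrt n), gridB n (pvCeilSqrt n)]
            exact branch_eq n hn (addGrid n (pvCeilSqrt n)) (edgesGrid n (pvCeilSqrt n))
              (valGrid n (pvCeilSqrt n) (pvCeilSqrt_pos n hn))
              (fun c x h0 h1 => memGrid n (pvCeilSqrt n) c x (pvCeilSqrt_pos n hn) h0 h1)
          · rw [if_neg hr, if_neg hl, if_neg ha, if_neg hg,
                if_neg hl, if_neg ha, if_neg hg]
            rw [ringA n, ringB n]
            exact branch_eq n hn (addRing n) (edgesRing n) (valRing n hn)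
              (fun c x h0 h1 => memRing n c x hn h0 h1)
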